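-- pv_equiv track=rewrite | github.com/submission-conf/neurips_cooperativeAI | utils.py | create_partition
-- ===== SOURCE A (Python) =====
-- def create_partition(liste):
--     if liste == []:
--         return ['x']
--     else:
--         a = liste[-1]
--         l = liste[:-1]
--         partition = create_partition(l)
--         new_partition = []
--         for c in partition:
--             new_partition.append(c)
--             if c == 'x':
--                 new_partition.append(a)
--             else:
--                 new_partition.append(c+a)
--         return new_partition
-- ===== SOURCE B (Python) =====
-- def create_partition(liste):
--     partition = ['x']
--     for a in liste:
--         new_partition = []
--         for c in partition:
--             new_partition.append(c)
--             new_partition.append(a if c == 'x' else c + a)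
--         partition = new_partition
--     return partition
-- ===== Notes on version B (the rewrite author's own statement) =====
-- stated objective: simpler
-- what changed: Replaced the tail-recursive decomposition on liste[-1]/liste[:-1] by a single forward left-fold loop that rebuilds the partition list once per element.
import Mathlib
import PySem

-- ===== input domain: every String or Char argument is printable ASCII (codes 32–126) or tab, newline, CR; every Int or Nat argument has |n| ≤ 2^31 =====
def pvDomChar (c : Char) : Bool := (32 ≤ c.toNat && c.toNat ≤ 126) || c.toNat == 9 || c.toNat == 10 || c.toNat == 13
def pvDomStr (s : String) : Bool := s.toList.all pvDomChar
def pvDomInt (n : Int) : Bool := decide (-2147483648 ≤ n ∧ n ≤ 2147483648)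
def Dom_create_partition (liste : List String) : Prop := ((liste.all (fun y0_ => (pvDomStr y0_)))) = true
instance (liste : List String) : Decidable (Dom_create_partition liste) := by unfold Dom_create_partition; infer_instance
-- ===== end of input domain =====

-- ===== PORT A =====
-- B replaces A's recursion on liste[-1]/liste[:-1] by a single forward left-fold loop (objective: simpler).
-- Port of A: recursion peeling the LAST element, inner loop as a foldl accumulating new_partition.
def create_partition (liste : List String) : List String :=
  if _h : liste = [] then ["x"]
  else
    let a := liste.getLast _h        -- liste[-1] (liste nonempty here)
    let l := liste.dropLast          -- liste[:-1]
    let partition := create_partition l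
    partition.foldl (fun new_partition c =>
      (new_partition ++ [c]) ++ (if c == "x" then [a] else [c ++ a])) []
termination_by liste.length
decreasing_by
  simp [List.length_dropLast]
  exact List.length_pos_iff.mpr _h

-- ===== PORT B =====
def create_partition_step (partition : List String) (a : String) : List String :=
  partition.foldl (fun new_partition c =>
    (new_partition ++ [c]) ++ [if c == "x" then a else c ++ a]) []

def create_partition_alt (liste : List String) : List String :=
  liste.foldl create_partition_step ["x"]

-- ===== PRECONDITION & SPEC =====
def Spec_create_partition (liste : List String) (out : List String) : Prop := out = create_partition_alt liste
instance (liste : List String) (out : List String) : Decidable (Spec_create_partition liste out) := by unfold Spec_create_partition; infer_instance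

-- ===== CLAIM (what is proved, stated in full; the proofs are below) =====
def Claim_equal_create_partition : Prop := ∀ (liste : List String), Dom_create_partition liste → Spec_create_partition liste (create_partition liste)

-- ===== LEMMAS AND PROOFS =====

-- A's inner loop and B's step compute the same list (the two ifs package the append differently).
theorem create_partition_loop_eq (partition : List String) (a : String) :
    partition.foldl (fun new_partition c =>
      (new_partition ++ [c]) ++ (if c == "x" then [a] else [c ++ a])) []
    = create_partition_step partition a := by
  unfold create_partition_step
  induction partition using List.reverseRecOn with
  | nil => rfl
  | append_singleton l c ih =>
      simp only [List.foldl_append, List.foldl_cons, List.foldl_nil, ih]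
      by_cases h : c = "x" <;> simp [h]

-- Peeling A's recursion: on a nonempty list it is B's step applied to the recursive call.
theorem create_partition_concat (l : List String) (a : String) :
    create_partition (l ++ [a]) = create_partition_step (create_partition l) a := by
  rw [create_partition.eq_def]
  rw [dif_neg (by simp : ¬(l ++ [a] = []))]
  simp only [List.dropLast_concat, List.getLast_concat]
  exact create_partition_loop_eq _ _

theorem create_partition_eq_alt (liste : List String) :
    create_partition liste = create_partition_alt liste := by
  unfold create_partition_alt
  induction liste using List.reverseRecOn with
  | nil => rw [create_partition.eq_def]; rfl
  | append_singleton l a ih =>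
      rw [create_partition_concat, ih, List.foldl_append, List.foldl_cons, List.foldl_nil]

-- ===== VERDICT (by name: the statement is the Claim_ definition above) =====
theorem create_partition_spec : Claim_equal_create_partition := by
  intro liste _
  exact create_partition_eq_alt liste
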